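-- pv_equiv track=rewrite | github.com/mattipalin/tira2024-part2 | biterase.py | count
-- ===== SOURCE A (Python) =====
-- def remove_index(s,i):
--     # given string s, returns the string with character removed from positions i and i+1
--     return s[:i] + s[i+2:]
--
-- count_dict = {"01": 1, "10": 1}
--
-- def count(s):
--     if len(s)%2 == 1: return 0
--     if not s: return 0
--     if s=="01" or s == "10": return 1
--     res = 0
--     # Find removable indices
--     removable_indices = [value for value in [i if s[i]!=s[i+1] else -1 for i in range(len(s)-1)] if value != -1]
--     # Then let's remove some indices!
--     for index_removed in removable_indices:
--         shortened = remove_index(s,index_removed)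
--         if shortened not in count_dict:
--             count_dict[shortened] = count(shortened)
--         res += count_dict[shortened]
--     return res
-- ===== SOURCE B (Python) =====
-- def count(s):
--     # Bottom-up DP: BFS layers of reachable states (longest to shortest),
--     # then a ways-table swept from the shortest layer upward.
--     if len(s) % 2 == 1 or not s:
--         return 0
--     layers = [[s]]
--     while len(layers[-1][0]) > 2:
--         nxt = []
--         for t in layers[-1]:
--             for i in range(len(t) - 1):
--                 if t[i] != t[i + 1]:
--                     c = t[:i] + t[i + 2:]
--                     if c not in nxt:
--                         nxt.append(c)
--         if not nxt:
--             break
--         layers.append(nxt)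
--     ways = {}
--     for layer in reversed(layers):
--         for t in layer:
--             if len(t) == 2:
--                 ways[t] = 1 if t in ("01", "10") else 0
--             else:
--                 v = 0
--                 for i in range(len(t) - 1):
--                     if t[i] != t[i + 1]:
--                         v += ways.get(t[:i] + t[i + 2:], 0)
--                 ways[t] = v
--     return ways[s]
-- ===== Notes on version B (the rewrite author's own statement) =====
-- stated objective: alternative
-- what changed: Replaces the top-down memoized recursion by an explicit bottom-up DP: a BFS collects the layers of reachable states, then a ways-table is filled from the shortest layer upward and ways[s] is returned.
import Mathlib
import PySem

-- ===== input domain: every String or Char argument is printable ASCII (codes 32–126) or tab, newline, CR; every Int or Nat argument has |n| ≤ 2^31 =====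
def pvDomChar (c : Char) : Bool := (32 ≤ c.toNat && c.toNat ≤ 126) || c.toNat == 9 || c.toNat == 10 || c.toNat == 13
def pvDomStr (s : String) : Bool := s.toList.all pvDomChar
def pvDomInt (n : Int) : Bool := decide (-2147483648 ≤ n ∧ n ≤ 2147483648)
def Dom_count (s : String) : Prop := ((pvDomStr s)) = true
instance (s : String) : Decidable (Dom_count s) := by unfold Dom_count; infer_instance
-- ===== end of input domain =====

-- B replaces A's top-down memoized recursion by an explicit bottom-up DP over the BFS layers of
-- reachable states (objective: alternative decomposition, same values).

-- ===== PORT A =====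
-- remove_index(s, i) = s[:i] + s[i+2:]; A only calls it with 0 ≤ i (a list-comprehension index).
def pvRemoveIndexA (l : List Char) (i : Int) : List Char :=
  PySem.List.slice l none (some i) ++ PySem.List.slice l (some (i + 2)) none

-- termination helper for the recursive calls of `countList` (cited in decreasing_by)
theorem pvRemoveIndexA_len_lt (l : List Char) (i : Nat) (h : i < l.length - 1) :
    (pvRemoveIndexA l (i : Int)).length < l.length := by
  have h2 : ((i : Int) + 2) = ((i + 2 : Nat) : Int) := by push_cast; ring
  simp only [pvRemoveIndexA, PySem.List.slice_to_natCast, h2, PySem.List.slice_from_natCast,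
    List.length_append, List.length_take, List.length_drop]
  omega

-- count(s), on the char list.  The global memo dict `count_dict` only caches values the recursion
-- itself computes (seeded with "01"/"10" ↦ 1, consistent with count), so `res += count_dict[shortened]`
-- adds exactly count(shortened): the port performs the recursive call directly.
-- s[i]/s[i+1] are in range (i < len-1), so l.getD is exact.
def countList (l : List Char) : Int :=
  if l.length % 2 = 1 then 0
  else if l = [] then 0
  else if l = ['0', '1'] ∨ l = ['1', '0'] then 1
  else
    -- removable_indices = [value for value in [i if s[i]!=s[i+1] else -1 for i in range(len(s)-1)] if value != -1]
    let removable : List Int :=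
      ((List.range (l.length - 1)).map
        (fun i => if l.getD i ' ' ≠ l.getD (i + 1) ' ' then (i : Int) else -1)).filter
        (fun v => v ≠ -1)
    removable.attach.foldl (fun res iv => res + countList (pvRemoveIndexA l iv.1)) 0
termination_by l.length
decreasing_by
  rcases iv with ⟨v, hv⟩
  have hv' : v ∈ ((List.range (l.length - 1)).map
      (fun i => if l.getD i ' ' ≠ l.getD (i + 1) ' ' then (i : Int) else -1)).filter
      (fun v => v ≠ -1) := hv
  simp only [List.mem_filter, List.mem_map, List.mem_range, decide_eq_true_eq] at hv'
  obtain ⟨⟨i, hi, hif⟩, hne⟩ := hv'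
  by_cases hcond : l.getD i ' ' ≠ l.getD (i + 1) ' '
  · simp only [if_pos hcond] at hif
    subst hif
    exact pvRemoveIndexA_len_lt l i hi
  · simp only [if_neg hcond] at hif
    subst hif
    exact absurd rfl hne

def count (s : String) : Int := countList s.toList

-- ===== PORT B =====
-- t[:i] + t[i+2:] for the Nat loop index i (0 ≤ i, so take/drop is exact).
def pvRemoveB (t : List Char) (i : Nat) : List Char := t.take i ++ t.drop (i + 2)

-- the inner while-body: collect the distinct children of one layer, first occurrence first
def pvNextLayer (layer : List (List Char)) : List (List Char) :=
  layer.foldl (fun nxt t =>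
    (List.range (t.length - 1)).foldl (fun nxt i =>
      if t.getD i ' ' ≠ t.getD (i + 1) ' ' then
        let c := pvRemoveB t i
        if c ∈ nxt then nxt else nxt ++ [c]
      else nxt) nxt) []

-- the while loop; fuel = |s| bounds the iterations (each layer is 2 chars shorter), so it is never exhausted
def pvBuildLayers : Nat → List (List Char) → List (List (List Char))
  | 0, cur => [cur]
  | fuel + 1, cur =>
    if 2 < (cur.headD []).length then
      let nxt := pvNextLayer cur
      if nxt = [] then [cur] else cur :: pvBuildLayers fuel nxt
    else [cur]

-- the per-state table entry
def pvWaysFor (d : PySem.Dict (List Char) Int) (t : List Char) : Int :=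
  if t.length = 2 then (if t = ['0', '1'] ∨ t = ['1', '0'] then 1 else 0)
  else
    (List.range (t.length - 1)).foldl (fun v i =>
      if t.getD i ' ' ≠ t.getD (i + 1) ' ' then v + d.getD (pvRemoveB t i) 0 else v) 0

-- for layer in reversed(layers): for t in layer: ways[t] = …
def pvWaysTable (layers : List (List (List Char))) : PySem.Dict (List Char) Int :=
  layers.reverse.foldl (fun d layer => layer.foldl (fun d t => d.insert t (pvWaysFor d t)) d)
    PySem.Dict.empty

def count_alt (s : String) : Int :=
  let l := s.toList
  if l.length % 2 = 1 then 0
  else if l = [] then 0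
  else
    -- ways[s]: the key is always present (s is in the first layer), so getD raises no KeyError
    (pvWaysTable (pvBuildLayers l.length [l])).getD l 0

-- ===== PRECONDITION & SPEC =====
def Spec_count (s : String) (out : Int) : Prop := out = count_alt s
instance (s : String) (out : Int) : Decidable (Spec_count s out) := by unfold Spec_count; infer_instance

-- ===== CLAIM (what is proved, stated in full; the proofs are below) =====
def Claim_equal_count : Prop := ∀ (s : String), Dom_count s → Spec_count s (count s)

-- ===== LEMMAS AND PROOFS =====

-- the children of a state, proof-side view
def pvKids (t : List Char) : List (List Char) :=
  ((List.range (t.length - 1)).filter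
    (fun i => t.getD i ' ' ≠ t.getD (i + 1) ' ')).map (pvRemoveB t)

-- every value stored in the table is the A-count of its key
def GoodD (d : PySem.Dict (List Char) Int) : Prop :=
  ∀ k v, d.get? k = some v → v = countList k

theorem length_pvRemoveB (t : List Char) (i : Nat) (h : i < t.length - 1) :
    (pvRemoveB t i).length = t.length - 2 := by
  simp only [pvRemoveB, List.length_append, List.length_take, List.length_drop]
  omega

theorem pvRemoveIndexA_eq (l : List Char) (i : Nat) :
    pvRemoveIndexA l (i : Int) = pvRemoveB l i := by
  have h2 : ((i : Int) + 2) = ((i + 2 : Nat) : Int) := by push_cast; ring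
  simp only [pvRemoveIndexA, pvRemoveB, PySem.List.slice_to_natCast, h2,
    PySem.List.slice_from_natCast]

theorem countList_nil : countList [] = 0 := by
  rw [countList]; simp

theorem mem_pvKids (t c : List Char) :
    c ∈ pvKids t ↔ ∃ i, i < t.length - 1 ∧ t.getD i ' ' ≠ t.getD (i + 1) ' ' ∧ c = pvRemoveB t i := by
  simp only [pvKids, List.mem_map, List.mem_filter, List.mem_range, decide_eq_true_eq]
  constructor
  · rintro ⟨i, ⟨hi, hu⟩, rfl⟩; exact ⟨i, hi, hu, rfl⟩
  · rintro ⟨i, hi, hu, rfl⟩; exact ⟨i, ⟨hi, hu⟩, rfl⟩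

-- A's sum form: on even, non-empty, non-base input, count is the sum of counts of the children
theorem pv_filter_map_map (ns : List Nat) (p : Nat → Prop) [DecidablePred p] (g : Int → Int) :
    ((ns.map (fun i => if p i then (i : Int) else -1)).filter (fun v => v ≠ -1)).map g =
      (ns.filter (fun i => p i)).map (fun i => g (Int.ofNat i)) := by
  induction ns with
  | nil => rfl
  | cons n t ih =>
    rw [List.map_cons, List.filter_cons, List.filter_cons]
    by_cases h : p n
    · have e1 : (if p n then (n : Int) else -1) = (n : Int) := if_pos h
      have e2 : (decide ((n : Int) ≠ -1)) = true := decide_eq_true (by omega)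
      have e3 : (decide (p n)) = true := decide_eq_true h
      rw [e1]
      simp only [e2, e3, if_true]
      rw [List.map_cons, List.map_cons, ih]
      rfl
    · have e1 : (if p n then (n : Int) else -1) = -1 := if_neg h
      have e2 : (decide ((-1 : Int) ≠ -1)) = false := by simp
      have e3 : (decide (p n)) = false := decide_eq_false h
      rw [e1]
      simp only [e2, e3]
      exact ih

-- A's sum form: on even, non-empty, non-base input, count is the sum of counts of the children
theorem countList_sum (l : List Char) (h2 : l.length % 2 = 0) (hne : l ≠ [])
    (hb : ¬(l = ['0', '1'] ∨ l = ['1', '0'])) :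
    countList l = ((pvKids l).map countList).sum := by
  rw [countList]
  have h1 : ¬(l.length % 2 = 1) := by omega
  rw [if_neg h1, if_neg hne, if_neg hb]
  rw [List.foldl_subtype (g := fun res v => res + countList (pvRemoveIndexA l v)) (fun b x h => rfl)]
  rw [List.unattach_attach, PySem.List.foldl_add]
  rw [pv_filter_map_map, pvKids, List.map_map, zero_add]
  apply congrArg List.sum
  apply List.map_congr_left
  intro i hi
  exact congrArg countList (pvRemoveIndexA_eq l i)

-- length-2 evaluation of A
theorem countList_01 : countList ['0', '1'] = 1 := by
  rw [countList]; simp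

theorem countList_10 : countList ['1', '0'] = 1 := by
  rw [countList]; simp

theorem countList_two (l : List Char) (h : l.length = 2) :
    countList l = if l = ['0', '1'] ∨ l = ['1', '0'] then 1 else 0 := by
  rcases l with _ | ⟨a, l⟩
  · simp at h
  rcases l with _ | ⟨b, l⟩
  · simp at h
  rcases l with _ | ⟨c, l⟩
  · by_cases hb : ([a, b] : List Char) = ['0', '1'] ∨ [a, b] = ['1', '0']
    · rw [if_pos hb]
      rcases hb with h' | h' <;> rw [h']
      · exact countList_01
      · exact countList_10
    · rw [if_neg hb, countList_sum [a, b] (by simp) (by simp) hb]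
      by_cases hab : a = b
      · simp [pvKids, hab]
      · simp [pvKids, pvRemoveB, List.range_succ, hab, countList_nil]
  · simp at h

-- membership in the fold that collects one state's children
theorem pv_mem_inner (t : List Char) (is : List Nat) (acc : List (List Char)) (c : List Char) :
    c ∈ is.foldl (fun nxt i =>
        if t.getD i ' ' ≠ t.getD (i + 1) ' ' then
          let c := pvRemoveB t i
          if c ∈ nxt then nxt else nxt ++ [c]
        else nxt) acc ↔
      c ∈ acc ∨ ∃ i ∈ is, t.getD i ' ' ≠ t.getD (i + 1) ' ' ∧ c = pvRemoveB t i := by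
  induction is generalizing acc with
  | nil => simp
  | cons i rest ih =>
    rw [List.foldl_cons, ih]
    constructor
    · rintro (hmem | hex)
      · by_cases hu : t.getD i ' ' ≠ t.getD (i + 1) ' '
        · simp only [if_pos hu] at hmem
          by_cases hc : pvRemoveB t i ∈ acc
          · simp only [hc, if_pos] at hmem
            exact Or.inl hmem
          · simp only [hc, if_neg, not_false_iff] at hmem
            rcases List.mem_append.1 hmem with h | h
            · exact Or.inl h
            · right; exact ⟨i, List.mem_cons_self, hu, (List.mem_singleton.1 h)⟩
        · simp only [if_neg hu] at hmem
          exact Or.inl hmem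
      · obtain ⟨j, hj, hu, hcj⟩ := hex
        exact Or.inr ⟨j, List.mem_cons_of_mem _ hj, hu, hcj⟩
    · rintro (hmem | ⟨j, hj, hu, hcj⟩)
      · left
        by_cases hu : t.getD i ' ' ≠ t.getD (i + 1) ' '
        · simp only [if_pos hu]
          by_cases hc : pvRemoveB t i ∈ acc
          · simp only [hc, if_pos]; exact hmem
          · simp only [hc, if_neg, not_false_iff]
            exact List.mem_append_left _ hmem
        · simp only [if_neg hu]; exact hmem
      · rcases List.mem_cons.1 hj with rfl | hj'
        · left
          by_cases hc : pvRemoveB t j ∈ acc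
          · simp only [if_pos hu, hc, if_pos] ; exact hcj ▸ hc
          · simp only [if_pos hu, hc, if_neg, not_false_iff]
            exact hcj ▸ List.mem_append_right _ (List.mem_singleton.2 rfl)
        · exact Or.inr ⟨j, hj', hu, hcj⟩

theorem mem_pvNextLayer (layer : List (List Char)) (c : List Char) :
    c ∈ pvNextLayer layer ↔ ∃ t ∈ layer, c ∈ pvKids t := by
  rw [pvNextLayer]
  suffices h : ∀ acc, c ∈ layer.foldl (fun nxt t =>
      (List.range (t.length - 1)).foldl (fun nxt i =>
        if t.getD i ' ' ≠ t.getD (i + 1) ' ' then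
          let c := pvRemoveB t i
          if c ∈ nxt then nxt else nxt ++ [c]
        else nxt) nxt) acc ↔ c ∈ acc ∨ ∃ t ∈ layer, c ∈ pvKids t by
    rw [h []]; simp
  induction layer with
  | nil => simp
  | cons t rest ih =>
    intro acc
    rw [List.foldl_cons, ih, pv_mem_inner]
    have hk : ∀ x : List Char, (x ∈ pvKids t ↔ ∃ i ∈ List.range (t.length - 1),
        t.getD i ' ' ≠ t.getD (i + 1) ' ' ∧ x = pvRemoveB t i) := by
      intro x
      rw [mem_pvKids]
      simp [List.mem_range]
    constructor
    · rintro ((h | h) | ⟨u, hu, hcu⟩)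
      · exact Or.inl h
      · exact Or.inr ⟨t, List.mem_cons_self, (hk c).2 h⟩
      · exact Or.inr ⟨u, List.mem_cons_of_mem _ hu, hcu⟩
    · rintro (h | ⟨u, hu, hcu⟩)
      · exact Or.inl (Or.inl h)
      · rcases List.mem_cons.1 hu with rfl | hu'
        · exact Or.inl (Or.inr ((hk c).1 hcu))
        · exact Or.inr ⟨u, hu', hcu⟩

-- for-loop sum with a filter condition, as a foldl
theorem pv_foldl_add_if {α : Type} (p : α → Prop) [DecidablePred p] (f : α → Int)
    (l : List α) (a : Int) :
    l.foldl (fun v x => if p x then v + f x else v) a =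
      a + ((l.filter (fun x => p x)).map f).sum := by
  induction l generalizing a with
  | nil => simp
  | cons x rest ih =>
    rw [List.foldl_cons, ih, List.filter_cons]
    by_cases h : p x
    · simp only [if_pos h, decide_eq_true h, if_true, List.map_cons, List.sum_cons]
      ring
    · simp only [if_neg h, decide_eq_false h, Bool.false_eq_true, if_false]

theorem pvWaysFor_correct (d : PySem.Dict (List Char) Int) (t : List Char) (hG : GoodD d)
    (h : t.length = 2 ∨ (t.length % 2 = 0 ∧ 2 < t.length ∧ ∀ c ∈ pvKids t, (d.get? c).isSome)) :
    pvWaysFor d t = countList t := by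
  rcases h with h2 | ⟨heven, hgt, hkids⟩
  · rw [pvWaysFor, if_pos h2, countList_two t h2]
  · have hne2 : t.length ≠ 2 := by omega
    have hne : t ≠ [] := by intro h; subst h; simp at hgt
    have hb : ¬(t = ['0', '1'] ∨ t = ['1', '0']) := by
      rintro (rfl | rfl) <;> simp at hne2
    rw [pvWaysFor, if_neg hne2, pv_foldl_add_if, zero_add,
      countList_sum t heven hne hb, pvKids, List.map_map]
    apply congrArg List.sum
    apply List.map_congr_left
    intro i hi
    have hik : pvRemoveB t i ∈ pvKids t := by
      rw [pvKids]
      exact List.mem_map_of_mem hi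
    obtain ⟨v, hv⟩ := Option.isSome_iff_exists.1 (hkids _ hik)
    rw [PySem.Dict.getD_eq_get?_getD, hv, hG _ _ hv]
    rfl

theorem processLayer_correct (layer : List (List Char)) (d0 : PySem.Dict (List Char) Int)
    (hG : GoodD d0)
    (h : ∀ t ∈ layer, t.length = 2 ∨
        (t.length % 2 = 0 ∧ 2 < t.length ∧ ∀ c ∈ pvKids t, (d0.get? c).isSome)) :
    GoodD (layer.foldl (fun d t => d.insert t (pvWaysFor d t)) d0) ∧
      (∀ k, (d0.get? k).isSome →
        ((layer.foldl (fun d t => d.insert t (pvWaysFor d t)) d0).get? k).isSome) ∧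
      (∀ t ∈ layer, ((layer.foldl (fun d t => d.insert t (pvWaysFor d t)) d0).get? t).isSome) := by
  induction layer generalizing d0 with
  | nil => exact ⟨hG, fun k hk => hk, by simp⟩
  | cons t rest ih =>
    have ht := h t List.mem_cons_self
    have hval : pvWaysFor d0 t = countList t := pvWaysFor_correct d0 t hG ht
    have hG1 : GoodD (d0.insert t (pvWaysFor d0 t)) := by
      intro k v hkv
      rw [PySem.Dict.get?_insert] at hkv
      by_cases hkt : k = t
      · rw [if_pos hkt] at hkv
        subst hkt
        rw [← hval]
        exact (Option.some_inj.1 hkv).symm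
      · exact hG k v (by rwa [if_neg hkt] at hkv)
    have hmono1 : ∀ k, (d0.get? k).isSome → ((d0.insert t (pvWaysFor d0 t)).get? k).isSome := by
      intro k hk
      rw [PySem.Dict.get?_insert]
      by_cases hkt : k = t
      · rw [if_pos hkt]; rfl
      · rwa [if_neg hkt]
    have h1 : ∀ u ∈ rest, u.length = 2 ∨
        (u.length % 2 = 0 ∧ 2 < u.length ∧
          ∀ c ∈ pvKids u, ((d0.insert t (pvWaysFor d0 t)).get? c).isSome) := by
      intro u hu
      rcases h u (List.mem_cons_of_mem _ hu) with h2 | ⟨he, hg, hk⟩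
      · exact Or.inl h2
      · exact Or.inr ⟨he, hg, fun c hc => hmono1 c (hk c hc)⟩
    obtain ⟨hGf, hmonof, hpresf⟩ := ih _ hG1 h1
    refine ⟨by rwa [List.foldl_cons], ?_, ?_⟩
    · intro k hk
      rw [List.foldl_cons]
      exact hmonof k (hmono1 k hk)
    · intro u hu
      rw [List.foldl_cons]
      rcases List.mem_cons.1 hu with rfl | hu'
      · apply hmonof
        rw [PySem.Dict.get?_insert, if_pos rfl]
        rfl
      · exact hpresf u hu'

-- the main induction over the BFS layers
theorem pvBuildLayers_correct (fuel : Nat) (cur : List (List Char)) (L : Nat)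
    (d0 : PySem.Dict (List Char) Int)
    (hlen : ∀ t ∈ cur, t.length = L) (heven : L % 2 = 0) (hL : 2 ≤ L) (hfuel : L ≤ fuel)
    (hne : cur ≠ []) (hG : GoodD d0) :
    GoodD ((pvBuildLayers fuel cur).reverse.foldl
        (fun d layer => layer.foldl (fun d t => d.insert t (pvWaysFor d t)) d) d0) ∧
      ∀ t ∈ cur, ((pvBuildLayers fuel cur).reverse.foldl
        (fun d layer => layer.foldl (fun d t => d.insert t (pvWaysFor d t)) d) d0).get? t =
          some (countList t) := by
  induction fuel generalizing cur L d0 with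
  | zero => omega
  | succ fuel ih =>
    obtain ⟨t0, cur', rfl⟩ : ∃ t0 cur', cur = t0 :: cur' := by
      cases cur with
      | nil => exact absurd rfl hne
      | cons a b => exact ⟨a, b, rfl⟩
    have ht0 : t0.length = L := hlen t0 List.mem_cons_self
    rw [pvBuildLayers]
    simp only [List.headD_cons]
    by_cases hgt : 2 < L
    · rw [if_pos (ht0 ▸ hgt)]
      by_cases hnil : pvNextLayer (t0 :: cur') = []
      · rw [if_pos hnil]
        have hcond : ∀ t ∈ t0 :: cur', t.length = 2 ∨
            (t.length % 2 = 0 ∧ 2 < t.length ∧ ∀ c ∈ pvKids t, (d0.get? c).isSome) := by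
          intro t htm
          right
          refine ⟨by rw [hlen t htm]; exact heven, by rw [hlen t htm]; exact hgt, ?_⟩
          intro c hc
          exfalso
          have hcn : c ∈ pvNextLayer (t0 :: cur') := (mem_pvNextLayer _ c).2 ⟨t, htm, hc⟩
          rw [hnil] at hcn
          simp at hcn
        obtain ⟨hGf, hmono, hpres⟩ := processLayer_correct _ d0 hG hcond
        rw [List.reverse_cons, List.reverse_nil, List.nil_append, List.foldl_cons,
          List.foldl_nil]
        refine ⟨hGf, fun t htm => ?_⟩
        obtain ⟨v, hv⟩ := Option.isSome_iff_exists.1 (hpres t htm)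
        rw [hv, hGf _ _ hv]
      · rw [if_neg hnil]
        have hnxtlen : ∀ u ∈ pvNextLayer (t0 :: cur'), u.length = L - 2 := by
          intro u hu
          obtain ⟨t, htm, hk⟩ := (mem_pvNextLayer _ u).1 hu
          obtain ⟨i, hi, _, rfl⟩ := (mem_pvKids t u).1 hk
          rw [length_pvRemoveB t i hi, hlen t htm]
        obtain ⟨hG1, hpres1⟩ := ih (pvNextLayer (t0 :: cur')) (L - 2) d0 hnxtlen
          (by omega) (by omega) (by omega) hnil hG
        rw [List.reverse_cons, List.foldl_append, List.foldl_cons, List.foldl_nil]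
        have hcond : ∀ t ∈ t0 :: cur', t.length = 2 ∨
            (t.length % 2 = 0 ∧ 2 < t.length ∧ ∀ c ∈ pvKids t,
              (((pvBuildLayers fuel (pvNextLayer (t0 :: cur'))).reverse.foldl
                (fun d layer => layer.foldl (fun d t => d.insert t (pvWaysFor d t)) d)
                  d0).get? c).isSome) := by
          intro t htm
          right
          refine ⟨by rw [hlen t htm]; exact heven, by rw [hlen t htm]; exact hgt, ?_⟩
          intro c hc
          have hcn : c ∈ pvNextLayer (t0 :: cur') := (mem_pvNextLayer _ c).2 ⟨t, htm, hc⟩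
          rw [hpres1 c hcn]
          rfl
        obtain ⟨hGf, hmono, hpres⟩ := processLayer_correct _ _ hG1 hcond
        refine ⟨hGf, fun t htm => ?_⟩
        obtain ⟨v, hv⟩ := Option.isSome_iff_exists.1 (hpres t htm)
        rw [hv, hGf _ _ hv]
    · rw [if_neg (by omega : ¬ 2 < t0.length)]
      have hL2 : L = 2 := by omega
      have hcond : ∀ t ∈ t0 :: cur', t.length = 2 ∨
          (t.length % 2 = 0 ∧ 2 < t.length ∧ ∀ c ∈ pvKids t, (d0.get? c).isSome) := by
        intro t htm
        exact Or.inl (by rw [hlen t htm, hL2])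
      obtain ⟨hGf, hmono, hpres⟩ := processLayer_correct _ d0 hG hcond
      rw [List.reverse_cons, List.reverse_nil, List.nil_append, List.foldl_cons,
        List.foldl_nil]
      refine ⟨hGf, fun t htm => ?_⟩
      obtain ⟨v, hv⟩ := Option.isSome_iff_exists.1 (hpres t htm)
      rw [hv, hGf _ _ hv]

-- ===== VERDICT (by name: the statement is the Claim_ definition above) =====
theorem count_spec : Claim_equal_count := by
  intro s _
  unfold Spec_count
  rw [count, count_alt]
  by_cases h1 : s.toList.length % 2 = 1
  · rw [if_pos h1, countList, if_pos h1]
  · rw [if_neg h1]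
    by_cases h2 : s.toList = []
    · rw [if_pos h2, h2, countList_nil]
    · rw [if_neg h2]
      have hlen2 : 2 ≤ s.toList.length := by
        have : s.toList.length ≠ 0 := fun h => h2 (List.length_eq_zero_iff.1 h)
        omega
      obtain ⟨hGf, hpres⟩ := pvBuildLayers_correct s.toList.length [s.toList]
        s.toList.length PySem.Dict.empty
        (by intro t ht; rw [List.mem_singleton.1 ht]) (by omega) hlen2 le_rfl
        (by simp) (by intro k v hkv; rw [PySem.Dict.get?_empty] at hkv; exact absurd hkv (by simp))
      rw [pvWaysTable, PySem.Dict.getD_eq_get?_getD,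
        hpres s.toList List.mem_cons_self, Option.getD_some]
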